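-- pv_equiv track=rewrite | github.com/aethersoft/textkit-learn | tklearn/utils/en_text.py | capitalized
-- ===== SOURCE A (Python) =====
-- cap_tr = {'start:a': 'lower', 'start:A': 'upper', 'lower:a': 'lower', 'lower:A': 'mixed', 'upper:a': 'cap',
--           'upper:A': 'upper', 'mixed:a': 'mixed', 'cap:a': 'cap', 'cap:A': 'mixed'}
--
-- cap_f = {'start': 'o', 'lower': 'lower', 'upper': 'o', 'mixed': 'o', 'cap': 'cap'}
--
-- def capitalized(s):
--     state = 'start'
--     for ch in s:
--         if 'a' <= ch <= 'z':
--             state = cap_tr[state + ':a']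
--         else:
--             state = cap_tr[state + ':A']
--     return cap_f[state]
-- ===== SOURCE B (Python) =====
-- def capitalized(s):
--     # skip the leading run of non-lowercase characters, then the rest must be
--     # one-or-more lowercase letters: 'lower' if nothing was skipped, 'cap' otherwise.
--     i = 0
--     n = len(s)
--     while i < n and not ('a' <= s[i] <= 'z'):
--         i += 1
--     if i < n and all('a' <= c <= 'z' for c in s[i:]):
--         return 'lower' if i == 0 else 'cap'
--     return 'o'
-- ===== Notes on version B (the rewrite author's own statement) =====
-- stated objective: simpler
-- what changed: Replaced the dict-driven five-state DFA with a direct two-phase scan: skip the leading non-lowercase run, then check the remainder is nonempty all-lowercase ('lower' if nothing skipped, 'cap' otherwise, else 'o').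
-- outside the precondition, e.g. on capitalized('aAA'): A raises KeyError, B returns 'o'
import Mathlib
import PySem

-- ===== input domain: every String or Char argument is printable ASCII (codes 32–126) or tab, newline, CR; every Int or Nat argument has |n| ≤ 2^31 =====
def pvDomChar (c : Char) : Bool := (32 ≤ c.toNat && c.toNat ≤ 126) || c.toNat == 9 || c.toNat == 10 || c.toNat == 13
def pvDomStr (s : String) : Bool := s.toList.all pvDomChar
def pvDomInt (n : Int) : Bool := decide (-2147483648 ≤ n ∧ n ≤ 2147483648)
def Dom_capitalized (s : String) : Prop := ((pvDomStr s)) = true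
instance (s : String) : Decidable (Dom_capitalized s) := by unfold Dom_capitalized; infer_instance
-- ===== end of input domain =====

-- B replaces the dict-driven DFA with a two-phase scan (skip leading non-lowercase,
-- then require a nonempty all-lowercase remainder); objective: simpler.

-- ===== PORT A =====
def capTr : PySem.Dict String String :=
  PySem.Dict.ofList [("start:a", "lower"), ("start:A", "upper"), ("lower:a", "lower"), ("lower:A", "mixed"),
   ("upper:a", "cap"), ("upper:A", "upper"), ("mixed:a", "mixed"), ("cap:a", "cap"), ("cap:A", "mixed")]

def capF : PySem.Dict String String :=
  PySem.Dict.ofList [("start", "o"), ("lower", "lower"), ("upper", "o"), ("mixed", "o"), ("cap", "cap")]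

-- one loop step; a missing transition key (Python KeyError) is `none`, absorbing
def capStep (st : Option String) (ch : Char) : Option String :=
  st.bind fun state =>
    if ('a' ≤ ch ∧ ch ≤ 'z') then PySem.Dict.get? capTr (state ++ ":a")
    else PySem.Dict.get? capTr (state ++ ":A")

def capitalized (s : String) : String :=
  ((s.toList.foldl capStep (some "start")).bind (fun st => PySem.Dict.get? capF st)).getD ""

-- ===== PORT B =====
def lowb (c : Char) : Bool := decide ('a' ≤ c) && decide (c ≤ 'z')

-- the `while` loop advancing i over the leading non-lowercase run
def nonLowerPrefixLen : List Char → Nat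
  | [] => 0
  | c :: cs => if lowb c then 0 else nonLowerPrefixLen cs + 1

def capitalized_alt (s : String) : String :=
  if nonLowerPrefixLen s.toList < s.toList.length && (s.toList.drop (nonLowerPrefixLen s.toList)).all lowb then
    if nonLowerPrefixLen s.toList == 0 then "lower" else "cap"
  else "o"

-- ===== PRECONDITION & SPEC =====
-- Pre_ excludes exactly the inputs on which A raises KeyError (the transition
-- table has no entry for a non-lowercase character in the mixed state): strings
-- with two or more non-lowercase characters after the first lowercase character.
def Pre_capitalized (s : String) : Prop :=
  ((s.toList.dropWhile (fun c => !lowb c)).countP (fun c => !lowb c)) ≤ 1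
instance (s : String) : Decidable (Pre_capitalized s) := by unfold Pre_capitalized; infer_instance

def pvWitness_capitalized : String := "Abc"

def Spec_capitalized (s : String) (out : String) : Prop := out = capitalized_alt s
instance (s : String) (out : String) : Decidable (Spec_capitalized s out) := by unfold Spec_capitalized; infer_instance

-- ===== CLAIM (what is proved, stated in full; the proofs are below) =====
def Claim_equal_capitalized : Prop := ∀ (s : String), Dom_capitalized s → Pre_capitalized s → Spec_capitalized s (capitalized s)

-- ===== LEMMAS AND PROOFS =====

theorem capStep_none (c : Char) : capStep none c = none := rfl

theorem lowb_iff (c : Char) : lowb c = true ↔ ('a' ≤ c ∧ c ≤ 'z') := by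
  simp [lowb]

theorem capStep_lower (c : Char) :
    capStep (some "lower") c = if lowb c then some "lower" else some "mixed" := by
  by_cases h : lowb c
  · rw [if_pos h]
    simp only [capStep, Option.bind_some, if_pos ((lowb_iff c).mp h)]
    decide
  · rw [if_neg h]
    have h' : ¬ ('a' ≤ c ∧ c ≤ 'z') := fun hc => h ((lowb_iff c).mpr hc)
    simp only [capStep, Option.bind_some, if_neg h']
    decide

theorem capStep_cap (c : Char) :
    capStep (some "cap") c = if lowb c then some "cap" else some "mixed" := by
  by_cases h : lowb c
  · rw [if_pos h]
    simp only [capStep, Option.bind_some, if_pos ((lowb_iff c).mp h)]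
    decide
  · rw [if_neg h]
    have h' : ¬ ('a' ≤ c ∧ c ≤ 'z') := fun hc => h ((lowb_iff c).mpr hc)
    simp only [capStep, Option.bind_some, if_neg h']
    decide

theorem capStep_mixed (c : Char) :
    capStep (some "mixed") c = if lowb c then some "mixed" else none := by
  by_cases h : lowb c
  · rw [if_pos h]
    simp only [capStep, Option.bind_some, if_pos ((lowb_iff c).mp h)]
    decide
  · rw [if_neg h]
    have h' : ¬ ('a' ≤ c ∧ c ≤ 'z') := fun hc => h ((lowb_iff c).mpr hc)
    simp only [capStep, Option.bind_some, if_neg h']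
    decide

theorem capStep_upper (c : Char) :
    capStep (some "upper") c = if lowb c then some "cap" else some "upper" := by
  by_cases h : lowb c
  · rw [if_pos h]
    simp only [capStep, Option.bind_some, if_pos ((lowb_iff c).mp h)]
    decide
  · rw [if_neg h]
    have h' : ¬ ('a' ≤ c ∧ c ≤ 'z') := fun hc => h ((lowb_iff c).mpr hc)
    simp only [capStep, Option.bind_some, if_neg h']
    decide

theorem run_none (cs : List Char) : cs.foldl capStep none = none := by
  induction cs with
  | nil => rfl
  | cons c cs ih => simpa [capStep_none] using ih

theorem run_mixed (cs : List Char) :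
    cs.foldl capStep (some "mixed") =
      if cs.countP (fun c => !lowb c) = 0 then some "mixed" else none := by
  induction cs with
  | nil => rfl
  | cons c cs ih =>
    by_cases h : lowb c <;>
      simp [List.foldl_cons, capStep_mixed, h, ih, run_none]

theorem run_lastlow (st : String) (hst : st = "lower" ∨ st = "cap") (cs : List Char) :
    cs.foldl capStep (some st) =
      if cs.countP (fun c => !lowb c) = 0 then some st
      else if cs.countP (fun c => !lowb c) = 1 then some "mixed" else none := by
  induction cs with
  | nil => simp
  | cons c cs ih =>
    have hstep : capStep (some st) c = if lowb c then some st else some "mixed" := by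
      rcases hst with h | h <;> subst h
      · exact capStep_lower c
      · exact capStep_cap c
    by_cases h : lowb c
    · simp [List.foldl_cons, hstep, h, ih]
    · rw [List.foldl_cons, hstep, if_neg (by simp [h]), run_mixed]
      rcases Nat.eq_zero_or_pos (cs.countP (fun c => !lowb c)) with h0 | h0
      · simp [h, h0]
      · have h1 : cs.countP (fun c => !lowb c) + 1 ≠ 1 := by omega
        have h2 : cs.countP (fun c => !lowb c) ≠ 0 := by omega
        simp [h, h2]

theorem run_upper (cs : List Char) :
    cs.foldl capStep (some "upper") =
      match cs.dropWhile (fun c => !lowb c) with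
      | [] => some "upper"
      | _ :: q => q.foldl capStep (some "cap") := by
  induction cs with
  | nil => rfl
  | cons c cs ih =>
    by_cases h : lowb c
    · simp [List.foldl_cons, capStep_upper, h]
    · simpa [List.foldl_cons, capStep_upper, h, List.dropWhile_cons] using ih

theorem nonLowerPrefixLen_eq (cs : List Char) :
    nonLowerPrefixLen cs = (cs.takeWhile (fun c => !lowb c)).length := by
  induction cs with
  | nil => rfl
  | cons c cs ih =>
    by_cases h : lowb c <;> simp [nonLowerPrefixLen, h, ih]

theorem drop_nonLowerPrefixLen (cs : List Char) :
    cs.drop (nonLowerPrefixLen cs) = cs.dropWhile (fun c => !lowb c) := by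
  rw [nonLowerPrefixLen_eq]
  induction cs with
  | nil => rfl
  | cons c cs ih =>
    by_cases h : lowb c <;> simp [h, ih]

theorem dropWhile_cons_sat {p : Char → Bool} {l : List Char} {d : Char} {q : List Char}
    (h : l.dropWhile p = d :: q) : p d = false := by
  induction l with
  | nil => simp at h
  | cons c cs ih =>
    by_cases hc : p c
    · rw [List.dropWhile_cons, if_pos hc] at h
      exact ih h
    · rw [List.dropWhile_cons, if_neg hc] at h
      injection h with h1 _
      subst h1
      simpa using hc

theorem countP_zero_iff_all (cs : List Char) :
    cs.countP (fun c => !lowb c) = 0 ↔ cs.all lowb = true := by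
  induction cs with
  | nil => simp
  | cons c cs ih => by_cases h : lowb c <;> simp [h, ih]

-- ===== VERDICT (by name: the statement is the Claim_ definition above) =====
theorem capitalized_spec : Claim_equal_capitalized := by
  intro s _ hpre
  unfold Spec_capitalized capitalized capitalized_alt
  rw [drop_nonLowerPrefixLen, nonLowerPrefixLen_eq]
  unfold Pre_capitalized at hpre
  generalize s.toList = cs at hpre ⊢
  have hlen : (cs.takeWhile (fun c => !lowb c)).length < cs.length ↔
      cs.dropWhile (fun c => !lowb c) ≠ [] := by
    constructor
    · intro hl he
      have := List.takeWhile_append_dropWhile (p := fun c => !lowb c) (l := cs)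
      rw [he, List.append_nil] at this
      rw [this] at hl
      omega
    · intro hne
      have h1 : (cs.takeWhile (fun c => !lowb c)).length +
          (cs.dropWhile (fun c => !lowb c)).length = cs.length := by
        have h2 := congrArg List.length
          (List.takeWhile_append_dropWhile (p := fun c => !lowb c) (l := cs))
        rwa [List.length_append] at h2
      have h2 : 0 < (cs.dropWhile (fun c => !lowb c)).length := List.length_pos_of_ne_nil hne
      omega
  cases cs with
  | nil => rfl
  | cons c r =>
    by_cases h : lowb c
    · -- head lowercase: dropWhile = c :: r, state goes to "lower"
      have hdw : (c :: r).dropWhile (fun c => !lowb c) = c :: r := by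
        simp [h]
      have htw : (c :: r).takeWhile (fun c => !lowb c) = [] := by
        simp [h]
      have hstep : capStep (some "start") c = some "lower" := by
        simp only [capStep, Option.bind_some, if_pos ((lowb_iff c).mp h)]
        decide
      rw [List.foldl_cons, hstep, run_lastlow "lower" (Or.inl rfl) r]
      rw [hdw] at hpre ⊢
      rw [htw]
      have hpre' : r.countP (fun c => !lowb c) ≤ 1 := by
        rw [List.countP_cons] at hpre
        simpa [h] using hpre
      rcases Nat.eq_zero_or_pos (r.countP (fun c => !lowb c)) with h0 | h0
      · have hall : (c :: r).all lowb = true := by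
          simp [h, (countP_zero_iff_all r).mp h0]
        simp [h0, hall]
        decide
      · have h1 : r.countP (fun c => !lowb c) = 1 := by omega
        have hnallr : r.all lowb = false := by
          cases hh : r.all lowb
          · rfl
          · exact absurd ((countP_zero_iff_all r).mpr hh) (by omega)
        have hnall : (c :: r).all lowb = false := by
          simp [hnallr]
        simp [h1, hnall]
        decide
    · -- head non-lowercase: state goes to "upper"
      have hstep : capStep (some "start") c = some "upper" := by
        have h' : ¬ ('a' ≤ c ∧ c ≤ 'z') := fun hc => h ((lowb_iff c).mpr hc)
        simp only [capStep, Option.bind_some, if_neg h']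
        decide
      rw [List.foldl_cons, hstep, run_upper r]
      have hdw : (c :: r).dropWhile (fun c => !lowb c) = r.dropWhile (fun c => !lowb c) := by
        simp [h]
      have htw : (c :: r).takeWhile (fun c => !lowb c) =
          c :: r.takeWhile (fun c => !lowb c) := by
        simp [h]
      rw [hdw] at hpre ⊢
      rw [htw]
      cases hq : r.dropWhile (fun c => !lowb c) with
      | nil =>
        have hd : r.takeWhile (fun c => !lowb c) = r := by
          have := List.takeWhile_append_dropWhile (p := fun c => !lowb c) (l := r)
          rw [hq, List.append_nil] at this; exact this
        rw [hd]
        simp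
        decide
      | cons d q =>
        have hd : lowb d = true := by
          have := dropWhile_cons_sat hq
          simpa using this
        rw [hq] at hpre
        have hmatch : (match d :: q with
            | [] => some "upper"
            | _ :: q => List.foldl capStep (some "cap") q) = List.foldl capStep (some "cap") q := rfl
        rw [hmatch, run_lastlow "cap" (Or.inr rfl) q]
        have hpre' : q.countP (fun c => !lowb c) ≤ 1 := by
          rw [List.countP_cons] at hpre
          simpa [hd] using hpre
        have hlt : (c :: r.takeWhile (fun c => !lowb c)).length < (c :: r).length := by
          have h1 : (r.takeWhile (fun c => !lowb c)).length +
              (r.dropWhile (fun c => !lowb c)).length = r.length := by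
            have h2 := congrArg List.length
              (List.takeWhile_append_dropWhile (p := fun c => !lowb c) (l := r))
            rwa [List.length_append] at h2
          rw [hq] at h1; simp at h1 ⊢; omega
        have hlt' : (r.takeWhile (fun c => !lowb c)).length < r.length := by
          simpa using hlt
        rcases Nat.eq_zero_or_pos (q.countP (fun c => !lowb c)) with h0 | h0
        · have hall : (d :: q).all lowb = true := by
            simp [hd, (countP_zero_iff_all q).mp h0]
          simp [h0, hall, hlt']
          decide
        · have h1 : q.countP (fun c => !lowb c) = 1 := by omega
          have hnallq : q.all lowb = false := by
            cases hh : q.all lowb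
            · rfl
            · exact absurd ((countP_zero_iff_all q).mpr hh) (by omega)
          have hnall : (d :: q).all lowb = false := by
            simp [hnallq]
          simp [h1, hnall, hlt']
          decide
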